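-- pv_equiv track=rewrite | github.com/gwonpy/jd_cookie | jdScript.py | get_cookie_str
-- ===== SOURCE A (Python) =====
-- def get_cookie_str(cookies_ls: list) -> str:
--     pt_key = ''
--     pt_pin = ''
--     for data in cookies_ls:
--         if data.get('name') == 'pt_pin':
--             pt_pin = data.get('value')
--         if data.get('name') == 'pt_key':
--             pt_key = data.get('value')
--     return f'pt_key={pt_key};pt_pin={pt_pin}'
-- ===== SOURCE B (Python) =====
-- def get_cookie_str(cookies_ls: list) -> str:
--     def last_value(name):
--         for d in reversed(cookies_ls):
--             if d.get('name') == name: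
--                 return f"{d.get('value')}"
--         return ''
--     return f"pt_key={last_value('pt_key')};pt_pin={last_value('pt_pin')}"
-- ===== Notes on version B (the rewrite author's own statement) =====
-- stated objective: alternative
-- what changed: Replaces A's forward fold with two running accumulators by a per-key backward search with early exit: the last occurrence of each cookie name is the first match when scanning the list in reverse, so no accumulator state is carried across the whole list.
import Mathlib
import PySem

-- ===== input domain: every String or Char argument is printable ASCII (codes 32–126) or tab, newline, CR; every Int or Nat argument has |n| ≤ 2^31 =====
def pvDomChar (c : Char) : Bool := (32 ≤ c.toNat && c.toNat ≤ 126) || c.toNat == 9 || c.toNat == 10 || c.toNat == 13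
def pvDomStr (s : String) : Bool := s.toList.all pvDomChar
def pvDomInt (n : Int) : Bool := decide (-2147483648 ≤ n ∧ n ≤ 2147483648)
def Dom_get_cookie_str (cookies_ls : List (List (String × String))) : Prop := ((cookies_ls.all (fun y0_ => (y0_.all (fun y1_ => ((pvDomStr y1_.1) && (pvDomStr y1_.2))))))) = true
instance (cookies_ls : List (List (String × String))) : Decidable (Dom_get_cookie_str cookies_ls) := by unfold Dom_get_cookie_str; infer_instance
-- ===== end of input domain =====

-- B replaces A's forward fold with two accumulators by a per-key backward search with early
-- exit (first match in the reversed list = last occurrence) — alternative decomposition;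
-- return values proved equal on the whole domain.


-- ===== PORT A =====
-- str(x) applied by the f-string: a variable holding None prints as "None"; we apply that
-- rendering at assignment time (exact, since the variable is only ever formatted).
def fmtVal (o : Option String) : String := o.getD "None"

-- A: two accumulators (pt_key, pt_pin), updated by the two if-branches in order, then formatted.
def get_cookie_str (cookies_ls : List (List (String × String))) : String :=
  let st := cookies_ls.foldl (fun (st : String × String) data =>
    let d := PySem.Dict.ofList data
    let st := if d.get? "name" == some "pt_pin" then (st.1, fmtVal (d.get? "value")) else st
    if d.get? "name" == some "pt_key" then (fmtVal (d.get? "value"), st.2) else st)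
    ("", "")
  "pt_key=" ++ st.1 ++ ";pt_pin=" ++ st.2

-- ===== PORT B =====
-- Source B's last_value: scan the reversed list, return the formatted value at the first
-- matching name (early exit), '' after the loop.
def lastValue (l : List (List (String × String))) (name : String) : String :=
  match l with
  | [] => ""
  | data :: rest =>
    let d := PySem.Dict.ofList data
    if d.get? "name" == some name then fmtVal (d.get? "value") else lastValue rest name

-- B: two independent backward searches, then formatting.
def get_cookie_str_alt (cookies_ls : List (List (String × String))) : String :=
  "pt_key=" ++ lastValue cookies_ls.reverse "pt_key" ++
  ";pt_pin=" ++ lastValue cookies_ls.reverse "pt_pin"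

-- ===== PRECONDITION & SPEC =====
def Spec_get_cookie_str (cookies_ls : List (List (String × String))) (out : String) : Prop := out = get_cookie_str_alt cookies_ls
instance (cookies_ls : List (List (String × String))) (out : String) : Decidable (Spec_get_cookie_str cookies_ls out) := by unfold Spec_get_cookie_str; infer_instance

-- ===== CLAIM (what is proved, stated in full; the proofs are below) =====
def Claim_equal_get_cookie_str : Prop := ∀ (cookies_ls : List (List (String × String))), Dom_get_cookie_str cookies_ls → Spec_get_cookie_str cookies_ls (get_cookie_str cookies_ls)

-- ===== LEMMAS AND PROOFS =====

-- proof helper: lastValue generalized over the not-found default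
def lastValueD (l : List (List (String × String))) (name dflt : String) : String :=
  match l with
  | [] => dflt
  | data :: rest =>
    let d := PySem.Dict.ofList data
    if d.get? "name" == some name then fmtVal (d.get? "value") else lastValueD rest name dflt

theorem lastValueD_append (xs ys : List (List (String × String))) (n d : String) :
    lastValueD (xs ++ ys) n d = lastValueD xs n (lastValueD ys n d) := by
  induction xs with
  | nil => rfl
  | cons a rest ih => simp only [List.cons_append, lastValueD, ih]

theorem lastValueD_empty (l : List (List (String × String))) (n : String) :
    lastValueD l n "" = lastValue l n := by
  induction l with
  | nil => rfl
  | cons a rest ih => simp only [lastValueD, lastValue, ih]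

-- loop invariant: A's fold over l, started at (k, p), ends at the backward searches over
-- l.reverse with defaults (k, p).
theorem loop_eq (l : List (List (String × String))) (k p : String) :
    l.foldl (fun (st : String × String) data =>
        let d := PySem.Dict.ofList data
        let st := if d.get? "name" == some "pt_pin" then (st.1, fmtVal (d.get? "value")) else st
        if d.get? "name" == some "pt_key" then (fmtVal (d.get? "value"), st.2) else st)
      (k, p)
    = (lastValueD l.reverse "pt_key" k, lastValueD l.reverse "pt_pin" p) := by
  induction l generalizing k p with
  | nil => rfl
  | cons data rest ih =>
    simp only [List.foldl_cons, List.reverse_cons, lastValueD_append]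
    by_cases hp : (PySem.Dict.ofList data).get? "name" = some "pt_pin" <;>
      by_cases hk : (PySem.Dict.ofList data).get? "name" = some "pt_key" <;>
      (simp_all [lastValueD]; try rw [ih])

-- ===== VERDICT (by name: the statement is the Claim_ definition above) =====
theorem get_cookie_str_spec : Claim_equal_get_cookie_str := by
  intro cookies_ls _
  unfold Spec_get_cookie_str get_cookie_str get_cookie_str_alt
  rw [loop_eq, lastValueD_empty, lastValueD_empty]
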